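-- pv_equiv track=rewrite | github.com/marinamorolopez/biohacking-bitup2022 | guide_mold_constructor.py | fromDNA
-- ===== SOURCE A (Python) =====
-- def fromDNA(mutated_genome_seq, mutation_position, tweet_DNA):
--
--     tweet_DNA_decoded = mutated_genome_seq[(mutation_position):(mutation_position + len(tweet_DNA))]
--     tweet_binary_decoded = ""
--     for base in tweet_DNA_decoded:
--         if base == "A":
--             tweet_binary_decoded += "00"
--         elif base == "T":
--             tweet_binary_decoded += "11"
--         elif base == "G":
--             tweet_binary_decoded += "01"
--         elif base == "C":
--             tweet_binary_decoded += "10"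
--     tweet_binary_decoded = [tweet_binary_decoded[i:i+8] for i in range(0, len(tweet_binary_decoded), 8)]
--
--     return(tweet_binary_decoded)
-- ===== SOURCE B (Python) =====
-- def fromDNA(mutated_genome_seq, mutation_position, tweet_DNA):
--     code = {"A": "00", "T": "11", "G": "01", "C": "10"}
--     window = mutated_genome_seq[mutation_position:mutation_position + len(tweet_DNA)]
--     codes = [code[b] for b in window if b in code]
--     out = []
--     while codes:
--         out.append("".join(codes[:4]))
--         codes = codes[4:]
--     return out
-- ===== Notes on version B (the rewrite author's own statement) =====
-- stated objective: alternative
-- what changed: B replaces A's flat binary-string accumulation followed by slicing into 8-character pieces with a code-per-base list (dict lookup, invalid bases filtered out) that is grouped into runs of 4 codes joined per chunk, eliminating the intermediate flat binary string and the index-range slicing pass.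
import Mathlib
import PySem

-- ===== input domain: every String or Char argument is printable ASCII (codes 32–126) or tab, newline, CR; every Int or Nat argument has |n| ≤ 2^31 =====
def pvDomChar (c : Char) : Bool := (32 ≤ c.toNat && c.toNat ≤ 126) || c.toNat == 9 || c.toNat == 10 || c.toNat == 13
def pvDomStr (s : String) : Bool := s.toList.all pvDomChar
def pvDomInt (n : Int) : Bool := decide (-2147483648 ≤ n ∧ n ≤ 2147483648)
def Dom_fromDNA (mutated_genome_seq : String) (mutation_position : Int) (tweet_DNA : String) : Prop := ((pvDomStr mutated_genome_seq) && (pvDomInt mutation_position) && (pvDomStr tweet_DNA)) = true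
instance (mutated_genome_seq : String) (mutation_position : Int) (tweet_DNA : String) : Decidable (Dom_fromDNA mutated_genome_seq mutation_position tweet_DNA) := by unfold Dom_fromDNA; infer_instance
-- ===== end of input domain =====

-- B maps each valid base to its 2-bit code via a dict (skipping other characters exactly as A's
-- if/elif chain does) and joins runs of 4 codes into one chunk, instead of A's flat binary string
-- re-sliced into 8-character pieces; same result, alternative decomposition (no speed claim).

-- ===== PORT A =====
def fromDNA (mutated_genome_seq : String) (mutation_position : Int) (tweet_DNA : String) : List String :=
  let tweet_DNA_decoded : List Char :=
    PySem.List.slice mutated_genome_seq.toList (some mutation_position)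
      (some (mutation_position + PySem.Str.len tweet_DNA))
  let tweet_binary_decoded : List Char :=
    tweet_DNA_decoded.foldl (fun acc base =>
      if base = 'A' then acc ++ ['0','0']
      else if base = 'T' then acc ++ ['1','1']
      else if base = 'G' then acc ++ ['0','1']
      else if base = 'C' then acc ++ ['1','0']
      else acc) []
  (PySem.List.pyRange 0 (tweet_binary_decoded.length : Int) 8).map
    (fun i => String.ofList (PySem.List.slice tweet_binary_decoded (some i) (some (i + 8))))

-- ===== PORT B =====
def pvCodeDict : PySem.Dict String String :=
  PySem.Dict.ofList [("A", "00"), ("T", "11"), ("G", "01"), ("C", "10")]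

-- 'while codes: out.append("".join(codes[:4])); codes = codes[4:]'
def pvJoinChunks : List String → List String
  | [] => []
  | c :: rest =>
    PySem.Str.join "" ((c :: rest).take 4) :: pvJoinChunks ((c :: rest).drop 4)
termination_by l => l.length
decreasing_by all_goals simp [List.length_drop]

def fromDNA_alt (mutated_genome_seq : String) (mutation_position : Int) (tweet_DNA : String) : List String :=
  let window : List Char :=
    PySem.List.slice mutated_genome_seq.toList (some mutation_position)
      (some (mutation_position + PySem.Str.len tweet_DNA))
  let codes : List String := window.filterMap (fun b => pvCodeDict.get? (String.ofList [b]))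
  pvJoinChunks codes

-- ===== PRECONDITION & SPEC =====
def Spec_fromDNA (mutated_genome_seq : String) (mutation_position : Int) (tweet_DNA : String) (out : List String) : Prop := out = fromDNA_alt mutated_genome_seq mutation_position tweet_DNA
instance (mutated_genome_seq : String) (mutation_position : Int) (tweet_DNA : String) (out : List String) : Decidable (Spec_fromDNA mutated_genome_seq mutation_position tweet_DNA out) := by unfold Spec_fromDNA; infer_instance

-- ===== CLAIM (what is proved, stated in full; the proofs are below) =====
def Claim_equal_fromDNA : Prop := ∀ (mutated_genome_seq : String) (mutation_position : Int) (tweet_DNA : String), Dom_fromDNA mutated_genome_seq mutation_position tweet_DNA → Spec_fromDNA mutated_genome_seq mutation_position tweet_DNA (fromDNA mutated_genome_seq mutation_position tweet_DNA)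

-- ===== LEMMAS AND PROOFS =====

-- the 2-bit code of a base ([] for any other character), and base validity
def pvCodeC (b : Char) : List Char :=
  if b = 'A' then ['0', '0'] else if b = 'T' then ['1', '1']
  else if b = 'G' then ['0', '1'] else if b = 'C' then ['1', '0'] else []

def pvOk (b : Char) : Bool := b == 'A' || b == 'T' || b == 'G' || b == 'C'

-- A's chunking, recursively: peel 8 characters at a time
def pvChunksRec : List Char → List String
  | [] => []
  | c :: rest => String.ofList ((c :: rest).take 8) :: pvChunksRec ((c :: rest).drop 8)
termination_by l => l.length
decreasing_by all_goals simp [List.length_drop]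

theorem pvChunksRec_nil : pvChunksRec [] = [] := by
  simp [pvChunksRec]

theorem pvChunksRec_cons (c : Char) (rest : List Char) :
    pvChunksRec (c :: rest) =
      String.ofList ((c :: rest).take 8) :: pvChunksRec ((c :: rest).drop 8) := by
  simp [pvChunksRec]

theorem pvJoinChunks_nil : pvJoinChunks [] = [] := by
  simp [pvJoinChunks]

theorem pvJoinChunks_cons (c : String) (rest : List String) :
    pvJoinChunks (c :: rest) =
      PySem.Str.join "" ((c :: rest).take 4) :: pvJoinChunks ((c :: rest).drop 4) := by
  simp [pvJoinChunks]

theorem pvFoldA_eq (l : List Char) (acc : List Char) :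
    l.foldl (fun acc base =>
      if base = 'A' then acc ++ ['0','0']
      else if base = 'T' then acc ++ ['1','1']
      else if base = 'G' then acc ++ ['0','1']
      else if base = 'C' then acc ++ ['1','0']
      else acc) acc = acc ++ l.flatMap pvCodeC := by
  induction l generalizing acc with
  | nil => simp
  | cons b t ih =>
    simp only [List.foldl_cons, List.flatMap_cons, ih]
    simp only [pvCodeC]
    split_ifs <;> simp

theorem pvFlatMap_filter (l : List Char) :
    l.flatMap pvCodeC = ((l.filter pvOk).map pvCodeC).flatten := by
  induction l with
  | nil => simp
  | cons b t ih =>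
    by_cases h : pvOk b = true
    · simp [List.filter_cons, h, ih]
    · have h' := h
      simp only [pvOk, Bool.or_eq_true, beq_iff_eq] at h'
      push_neg at h'
      obtain ⟨⟨⟨h1, h2⟩, h3⟩, h4⟩ := h'
      have hnil : pvCodeC b = [] := by
        simp [pvCodeC, h1, h2, h3, h4]
      simp [List.filter_cons, h, ih, hnil]

theorem pvCode_len (b : Char) (h : pvOk b = true) : (pvCodeC b).length = 2 := by
  simp only [pvOk, Bool.or_eq_true, beq_iff_eq] at h
  rcases h with ((h | h) | h) | h <;> subst h <;> decide

theorem pvGet?_code (b : Char) :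
    pvCodeDict.get? (String.ofList [b]) =
      if pvOk b then some (String.ofList (pvCodeC b)) else none := by
  by_cases hA : b = 'A'; · subst hA; decide
  by_cases hT : b = 'T'; · subst hT; decide
  by_cases hG : b = 'G'; · subst hG; decide
  by_cases hC : b = 'C'; · subst hC; decide
  have hok : pvOk b = false := by
    simp [pvOk, hA, hT, hG, hC]
  rw [hok, if_neg (by simp)]
  have hmk : pvCodeDict = PySem.Dict.mk [("A","00"),("T","11"),("G","01"),("C","10")] := by
    decide
  have key : ∀ (s : String) (c : Char), s = String.ofList [c] → c ≠ b →
      (s == String.ofList [b]) = false := by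
    intro s c hs hc
    subst hs
    apply beq_eq_false_iff_ne.mpr
    intro he
    apply hc
    have := congrArg String.toList he
    simpa using this
  rw [hmk]
  simp only [PySem.Dict.get?_mk_cons]
  rw [key "A" 'A' rfl (fun h => hA h.symm), key "T" 'T' rfl (fun h => hT h.symm),
      key "G" 'G' rfl (fun h => hG h.symm), key "C" 'C' rfl (fun h => hC h.symm)]
  simp [PySem.Dict.get?]

theorem pvFilterMap_eq (l : List Char) :
    l.filterMap (fun b => pvCodeDict.get? (String.ofList [b])) =
      (l.filter pvOk).map (fun b => String.ofList (pvCodeC b)) := by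
  induction l with
  | nil => simp
  | cons b t ih =>
    rw [List.filterMap_cons, List.filter_cons, pvGet?_code]
    by_cases h : pvOk b = true
    · simp only [h, if_true]
      simp [ih]
    · simp only [h]
      simp [h, ih]

-- A's range/slice comprehension, rewritten in drop/take form
theorem pvRangeForm (s : List Char) :
    (PySem.List.pyRange 0 (s.length : Int) 8).map
      (fun i => String.ofList (PySem.List.slice s (some i) (some (i + 8)))) =
    (List.range ((s.length + 7) / 8)).map
      (fun k => String.ofList ((s.drop (8 * k)).take 8)) := by
  rw [PySem.List.pyRange_of_pos 0 (s.length : Int) (by norm_num), List.map_map]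
  have hcount : (if (0:Int) < (s.length : Int)
      then (((s.length : Int) - 0 + 8 - 1) / 8).toNat else 0) = (s.length + 7) / 8 := by
    split_ifs with h <;> omega
  rw [hcount]
  apply List.map_congr_left
  intro k _
  show String.ofList (PySem.List.slice s (some (0 + 8 * (k : Int))) (some (0 + 8 * (k : Int) + 8)))
      = String.ofList ((s.drop (8 * k)).take 8)
  have h1 : (0:Int) + 8 * (k : Int) = ((8 * k : Nat) : Int) := by push_cast; ring
  rw [h1]
  have h2 : ((8 * k : Nat) : Int) + 8 = ((8 * k : Nat) : Int) + ((8 : Nat) : Int) := by norm_num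
  rw [h2, PySem.List.slice_natCast_add]

theorem pvRangeChunks (s : List Char) :
    (List.range ((s.length + 7) / 8)).map
      (fun k => String.ofList ((s.drop (8 * k)).take 8)) = pvChunksRec s := by
  induction hn : s.length using Nat.strong_induction_on generalizing s with
  | _ n ih =>
    cases s with
    | nil =>
      subst hn
      simp [pvChunksRec_nil]
    | cons c rest =>
      subst hn
      have hlen : ((c :: rest).length + 7) / 8 = (((c :: rest).drop 8).length + 7) / 8 + 1 := by
        simp [List.length_drop]; omega
      have ihd := ih ((c :: rest).drop 8).length (by simp [List.length_drop] <;> omega)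
        ((c :: rest).drop 8) rfl
      rw [hlen, List.range_succ_eq_map, List.map_cons, List.map_map, pvChunksRec_cons, ← ihd]
      congr 1
      apply List.map_congr_left
      intro k _
      simp only [Function.comp_apply, Nat.succ_eq_add_one]
      have hd : (c :: rest).drop (8 * (k + 1)) = rest.drop (7 + 8 * k) := by
        rw [show 8 * (k + 1) = 7 + 8 * k + 1 from by omega, List.drop_succ_cons]
      rw [hd, List.drop_drop, show (8:Nat) + 8 * k = 7 + 8 * k + 1 from by omega,
          List.drop_succ_cons]

theorem pvTakeDrop2 (c : List (List Char)) (h : ∀ x ∈ c, x.length = 2) (m : Nat) :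
    c.flatten.take (2 * m) = (c.take m).flatten ∧
    c.flatten.drop (2 * m) = (c.drop m).flatten := by
  induction c generalizing m with
  | nil => simp
  | cons y t ih =>
    cases m with
    | zero => simp
    | succ m' =>
      have hy : y.length = 2 := h y (by simp)
      have iht := ih (fun x hx => h x (by simp [hx])) m'
      constructor
      · rw [List.flatten_cons, List.take_append, List.take_of_length_le (by omega), hy,
            show 2 * (m' + 1) - 2 = 2 * m' by omega, iht.1, List.take_succ_cons,
            List.flatten_cons]
      · rw [List.flatten_cons, List.drop_append, List.drop_eq_nil_of_le (by omega), hy,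
            show 2 * (m' + 1) - 2 = 2 * m' by omega, iht.2, List.drop_succ_cons,
            List.nil_append]

theorem pvChars_join_nil_flatten (l : List (List Char)) :
    PySem.Chars.join [] l = l.flatten := by
  induction l with
  | nil => simp [PySem.Chars.join_nil]
  | cons p rest ih =>
    cases rest with
    | nil => simp [PySem.Chars.join_singleton]
    | cons q r =>
      rw [PySem.Chars.join_cons_cons]
      simp [ih]

theorem pvJoinEq (l : List (List Char)) :
    PySem.Str.join "" (l.map String.ofList) = String.ofList l.flatten := by
  apply String.toList_inj.mp
  rw [PySem.Str.toList_join]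
  simp [Function.comp_def, pvChars_join_nil_flatten]

theorem pvChunkJoin (c : List (List Char)) (h : ∀ x ∈ c, x.length = 2) :
    pvChunksRec c.flatten = pvJoinChunks (c.map String.ofList) := by
  induction hn : c.length using Nat.strong_induction_on generalizing c with
  | _ n ih =>
    cases c with
    | nil => simp [pvChunksRec_nil, pvJoinChunks_nil]
    | cons y t =>
      subst hn
      have hy : y.length = 2 := h y (by simp)
      obtain ⟨a, b2, rfl⟩ := List.length_eq_two.mp hy
      have hfl : ([a, b2] :: t).flatten = a :: b2 :: t.flatten := by simp
      have h2 := pvTakeDrop2 ([a, b2] :: t) h 4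
      have hhead : String.ofList ((a :: b2 :: t.flatten).take 8)
          = PySem.Str.join "" ((List.map String.ofList ([a, b2] :: t)).take 4) := by
        rw [← hfl, show (8:Nat) = 2 * 4 from rfl, h2.1, ← List.map_take]
        exact (pvJoinEq _).symm
      have htail : pvChunksRec ((a :: b2 :: t.flatten).drop 8)
          = pvJoinChunks ((List.map String.ofList ([a, b2] :: t)).drop 4) := by
        rw [← hfl, show (8:Nat) = 2 * 4 from rfl, h2.2, ← List.map_drop]
        exact ih (([a, b2] :: t).drop 4).length (by simp [List.length_drop] <;> omega) _
          (fun x hx => h x (List.mem_of_mem_drop hx)) rfl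
      rw [hfl, pvChunksRec_cons, List.map_cons, pvJoinChunks_cons, ← List.map_cons,
          hhead, htail]

-- ===== VERDICT (by name: the statement is the Claim_ definition above) =====
theorem fromDNA_spec : Claim_equal_fromDNA := by
  intro mgs pos tdna _
  show fromDNA mgs pos tdna = fromDNA_alt mgs pos tdna
  simp only [fromDNA, fromDNA_alt]
  rw [pvFoldA_eq, List.nil_append, pvRangeForm, pvRangeChunks, pvFlatMap_filter,
      pvFilterMap_eq]
  have hlen2 : ∀ x ∈ ((PySem.List.slice mgs.toList (some pos)
      (some (pos + PySem.Str.len tdna))).filter pvOk).map pvCodeC, x.length = 2 := by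
    intro x hx
    obtain ⟨b, hb, rfl⟩ := List.mem_map.mp hx
    exact pvCode_len b (List.of_mem_filter hb)
  rw [pvChunkJoin _ hlen2, List.map_map]
  rfl
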